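-- pv_equiv track=rewrite | github.com/dannev96/api_challenge | src/validaciones.py | validar_dato2
-- ===== SOURCE A (Python) =====
-- def validar_dato2(dato2: str) -> bool:
--     try:
--         if dato2 == None :
--             dato2f = ['2021']
--         else:
--             dato2 = dato2.split(',')
--             dato2f = []
--             for veri in dato2:
--                 try:
--                     veri = int(veri)
--                     if veri >= 1000 and veri <= 9999:
--                         dato2f.append(str(veri))
--                     else:
--                         dato2f.append('2021')
--                 except:
--                     dato2f.append('2021')
--             if len(dato2f) == 0 :
--                 dato2f = ['2021']
--         return dato2f[0]
--     except:
--         return '2021'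
-- ===== SOURCE B (Python) =====
-- def validar_dato2(dato2: str) -> bool:
--     if dato2 == None:
--         return '2021'
--     try:
--         year = int(dato2.split(',')[0])
--         return str(year) if 1000 <= year <= 9999 else '2021'
--     except:
--         return '2021'
-- ===== Notes on version B (the rewrite author's own statement) =====
-- stated objective: simpler
-- what changed: B drops A's loop that validates every comma-separated token and the accumulated list: only the first token is split off, parsed and range-checked, returning its normalized form or '2021'.
import Mathlib
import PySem

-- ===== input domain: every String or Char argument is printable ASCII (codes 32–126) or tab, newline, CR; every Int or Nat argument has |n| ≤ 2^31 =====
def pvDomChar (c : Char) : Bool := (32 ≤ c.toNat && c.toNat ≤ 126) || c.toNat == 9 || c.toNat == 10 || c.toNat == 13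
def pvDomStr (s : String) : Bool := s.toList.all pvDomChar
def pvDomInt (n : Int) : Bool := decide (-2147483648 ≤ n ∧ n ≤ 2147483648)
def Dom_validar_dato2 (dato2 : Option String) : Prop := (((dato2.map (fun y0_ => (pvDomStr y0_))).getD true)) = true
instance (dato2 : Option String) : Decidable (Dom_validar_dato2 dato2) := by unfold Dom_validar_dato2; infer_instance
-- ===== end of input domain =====

-- B validates only the first comma-separated token instead of looping over all of them (simpler decomposition).

-- ===== PORT A =====
def validar_dato2 (dato2 : Option String) : String :=
  match dato2 with
  | none =>
    -- dato2f = ['2021']; return dato2f[0]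
    match PySem.List.pyGet? ["2021"] 0 with
    | some r => r
    | none => "2021"          -- outer except
  | some s =>
    match PySem.Str.split? s "," with
    | none => "2021"          -- outer except (unreachable: sep is non-empty)
    | some parts =>
    let dato2f : List String := parts.foldl (fun acc veri =>
      match PySem.Int.ofStr? veri with
      | some v => if 1000 ≤ v ∧ v ≤ 9999 then acc ++ [PySem.Int.toStr v] else acc ++ ["2021"]
      | none => acc ++ ["2021"]) []
    let dato2f := if dato2f.length = 0 then ["2021"] else dato2f
    match PySem.List.pyGet? dato2f 0 with
    | some r => r
    | none => "2021"          -- outer except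

-- ===== PORT B =====
def validar_dato2_alt (dato2 : Option String) : String :=
  match dato2 with
  | none => "2021"
  | some s =>
    match PySem.Str.split? s "," with
    | none => "2021"          -- bare except (unreachable: sep is non-empty)
    | some parts =>
    match PySem.List.pyGet? parts 0 with
    | none => "2021"          -- bare except
    | some t =>
      match PySem.Int.ofStr? t with
      | none => "2021"        -- bare except
      | some y => if 1000 ≤ y ∧ y ≤ 9999 then PySem.Int.toStr y else "2021"

-- ===== PRECONDITION & SPEC =====
def Spec_validar_dato2 (dato2 : Option String) (out : String) : Prop := out = validar_dato2_alt dato2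
instance (dato2 : Option String) (out : String) : Decidable (Spec_validar_dato2 dato2 out) := by unfold Spec_validar_dato2; infer_instance

-- ===== CLAIM (what is proved, stated in full; the proofs are below) =====
def Claim_equal_validar_dato2 : Prop := ∀ (dato2 : Option String), Dom_validar_dato2 dato2 → Spec_validar_dato2 dato2 (validar_dato2 dato2)

-- ===== LEMMAS AND PROOFS =====
-- A's loop appends one validated string per token: the fold is acc ++ map f.
lemma pv_fold_map (f : String → String) (xs : List String) (acc : List String) :
    xs.foldl (fun a v => a ++ [f v]) acc = acc ++ xs.map f := by
  induction xs generalizing acc with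
  | nil => simp
  | cons x t ih => simp [List.foldl, ih, List.append_assoc]

-- ===== VERDICT (by name: the statement is the Claim_ definition above) =====
theorem validar_dato2_spec : Claim_equal_validar_dato2 := by
  intro dato2 _
  unfold Spec_validar_dato2 validar_dato2 validar_dato2_alt
  cases dato2 with
  | none => rfl
  | some s =>
    simp only
    cases hsp : PySem.Str.split? s "," with
    | none => rfl
    | some parts =>
      simp only
      have hfold : parts.foldl (fun acc veri =>
          match PySem.Int.ofStr? veri with
          | some v => if 1000 ≤ v ∧ v ≤ 9999 then acc ++ [PySem.Int.toStr v] else acc ++ ["2021"]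
          | none => acc ++ ["2021"]) ([] : List String)
          = parts.map (fun veri =>
          match PySem.Int.ofStr? veri with
          | some v => if 1000 ≤ v ∧ v ≤ 9999 then PySem.Int.toStr v else "2021"
          | none => "2021") := by
        have h2 := pv_fold_map (fun veri =>
          match PySem.Int.ofStr? veri with
          | some v => if 1000 ≤ v ∧ v ≤ 9999 then PySem.Int.toStr v else "2021"
          | none => "2021") parts []
        rw [List.nil_append] at h2
        rw [← h2]
        apply PySem.List.foldl_congr_mem
        intro a v _
        cases hv : PySem.Int.ofStr? v <;> simp <;> split_ifs <;> rfl
      rw [hfold]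
      cases parts with
      | nil => rfl
      | cons t rest =>
        simp only [List.map, List.length_cons, PySem.List.pyGet?, PySem.List.pyIdx?]
        norm_num
        cases hv : PySem.Int.ofStr? t <;> simp
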